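-- pv_equiv track=rewrite | github.com/sbarczyk/WDI | Pycharm/Kolokwia/Kolokwium - 1/kol_21_22_zad_2_A.py | czy_4_zgodne
-- ===== SOURCE A (Python) =====
-- def czy_4_zgodne(a, b):
--     T = [0] * 4
--     while a > 0:
--         if T[a % 4] == 0:
--             T[a % 4] = 1
--         a //= 4
--
--     while b > 0:
--         if T[b % 4] == 1:
--             T[b % 4] = 2
--         elif T[b % 4] == 0:
--             return False
--         b //= 4
--
--     for element in T:
--         if element == 1:
--             return False
--     return True
-- ===== SOURCE B (Python) =====
-- def czy_4_zgodne(a, b):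
--     def mask(n):
--         # bitmask of the base-4 digits of n (bit d set iff digit d occurs)
--         return 0 if n <= 0 else mask(n // 4) | (1 << (n % 4))
--     return mask(a) == mask(b)
-- ===== Notes on version B (the rewrite author's own statement) =====
-- stated objective: alternative
-- what changed: Replaces A's iterative tri-state marking table with interleaved early-exit and a final scan by a recursive helper that folds each number's base-4 digits into an integer bitmask, then compares the two bitmasks for equality.
import Mathlib
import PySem

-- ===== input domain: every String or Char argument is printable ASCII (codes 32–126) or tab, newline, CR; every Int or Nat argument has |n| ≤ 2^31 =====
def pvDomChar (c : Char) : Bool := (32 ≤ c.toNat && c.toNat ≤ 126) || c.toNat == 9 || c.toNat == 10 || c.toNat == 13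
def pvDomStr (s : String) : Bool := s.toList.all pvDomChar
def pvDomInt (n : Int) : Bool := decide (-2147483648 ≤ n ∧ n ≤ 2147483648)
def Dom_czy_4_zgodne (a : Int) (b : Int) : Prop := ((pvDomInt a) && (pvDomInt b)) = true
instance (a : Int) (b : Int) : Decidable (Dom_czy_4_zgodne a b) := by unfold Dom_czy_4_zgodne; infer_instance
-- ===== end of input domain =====

-- B replaces A's tri-state marking table (with early exit and final scan) by a
-- recursive helper folding each number's base-4 digits into an integer bitmask,
-- comparing the two bitmasks for equality (same cost, alternative structure).


-- ===== PORT A =====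
-- `while a > 0: if T[a%4]==0: T[a%4]=1; a //= 4`
def czyA_loop1 (a : Int) (T : List Int) : List Int :=
  if _h : a > 0 then
    czyA_loop1 (PySem.Int.floordiv a 4)
      (if PySem.List.pyGetD T (PySem.Int.mod a 4) 0 == 0
       then PySem.List.pySetD T (PySem.Int.mod a 4) 1 else T)
  else T
termination_by a.toNat
decreasing_by
  have h4 := PySem.Int.floordiv_eq_ediv_of_pos (a := a) (b := 4) (by omega)
  rw [h4]; omega

-- `while b > 0: if T[b%4]==1: T[b%4]=2 elif T[b%4]==0: return False; b //= 4`
def czyA_loop2 (b : Int) (T : List Int) : Option (List Int) :=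
  if _h : b > 0 then
    if PySem.List.pyGetD T (PySem.Int.mod b 4) 0 == 1 then
      czyA_loop2 (PySem.Int.floordiv b 4) (PySem.List.pySetD T (PySem.Int.mod b 4) 2)
    else if PySem.List.pyGetD T (PySem.Int.mod b 4) 0 == 0 then none
    else czyA_loop2 (PySem.Int.floordiv b 4) T
  else some T
termination_by b.toNat
decreasing_by
  all_goals
    have h4 := PySem.Int.floordiv_eq_ediv_of_pos (a := b) (b := 4) (by omega)
    rw [h4]; omega

def czy_4_zgodne (a : Int) (b : Int) : Bool :=
  match czyA_loop2 b (czyA_loop1 a [0, 0, 0, 0]) with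
  | none => false
  | some T => T.all (fun element => !(element == 1))
  -- the final `for element in T: if element == 1: return False; return True`

-- ===== PORT B =====
-- helper mask(n): `return 0 if n <= 0 else mask(n // 4) | (1 << (n % 4))`
-- the shift exponent n % 4 is ≥ 0 (positive divisor), so `.toNat` is exact here
def pvMask (n : Int) : Int :=
  if _h : n ≤ 0 then 0
  else PySem.Int.bor (pvMask (PySem.Int.floordiv n 4)) ((1 : Int) <<< (PySem.Int.mod n 4).toNat)
termination_by n.toNat
decreasing_by
  have h4 := PySem.Int.floordiv_eq_ediv_of_pos (a := n) (b := 4) (by omega)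
  rw [h4]; omega

def czy_4_zgodne_alt (a : Int) (b : Int) : Bool :=
  pvMask a == pvMask b

-- ===== PRECONDITION & SPEC =====
def Spec_czy_4_zgodne (a : Int) (b : Int) (out : Bool) : Prop := out = czy_4_zgodne_alt a b
instance (a : Int) (b : Int) (out : Bool) : Decidable (Spec_czy_4_zgodne a b out) := by unfold Spec_czy_4_zgodne; infer_instance

-- ===== CLAIM (what is proved, stated in full; the proofs are below) =====
def Claim_equal_czy_4_zgodne : Prop := ∀ (a : Int) (b : Int), Dom_czy_4_zgodne a b → Spec_czy_4_zgodne a b (czy_4_zgodne a b)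

-- ===== LEMMAS AND PROOFS =====

-- membership in the set of base-4 digits of n, as a recursive Bool predicate (proof-side only)
def pvDmem (d : Int) (n : Int) : Bool :=
  if _h : n > 0 then (d == PySem.Int.mod n 4) || pvDmem d (PySem.Int.floordiv n 4) else false
termination_by n.toNat
decreasing_by
  have h4 := PySem.Int.floordiv_eq_ediv_of_pos (a := n) (b := 4) (by omega)
  rw [h4]; omega

-- the value of a four-bit mask as a function of its bits (proof-side only)
def pvWt (p q r s : Bool) : Int :=
  (if p then 1 else 0) + (if q then 2 else 0) + (if r then 4 else 0) + (if s then 8 else 0)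

lemma pvWt_bor (p q r s p' q' r' s' : Bool) :
    PySem.Int.bor (pvWt p q r s) (pvWt p' q' r' s') =
      pvWt (p || p') (q || q') (r || r') (s || s') := by
  revert p q r s p' q' r' s'; decide

lemma pvWt_inj (p q r s p' q' r' s' : Bool) :
    pvWt p q r s = pvWt p' q' r' s' ↔ (p = p' ∧ q = q' ∧ r = r' ∧ s = s') := by
  revert p q r s p' q' r' s'; decide

lemma pvDmem_range (d n : Int) (hmem : pvDmem d n = true) : 0 ≤ d ∧ d < 4 := by
  fun_induction pvDmem d n with
  | case1 n h ih =>
    simp only [Bool.or_eq_true, beq_iff_eq] at hmem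
    rcases hmem with h1 | h1
    · subst h1
      exact ⟨PySem.Int.mod_nonneg _ (by omega), PySem.Int.mod_lt _ (by omega)⟩
    · exact ih h1
  | case2 n h =>
    simp at hmem

lemma shift_eq_wt (m : Int) (h0 : 0 ≤ m) (h4 : m < 4) :
    ((1 : Int) <<< m.toNat) = pvWt (m == 0) (m == 1) (m == 2) (m == 3) := by
  interval_cases m <;> decide

lemma mask_eq_wt (n : Int) :
    pvMask n = pvWt (pvDmem 0 n) (pvDmem 1 n) (pvDmem 2 n) (pvDmem 3 n) := by
  fun_induction pvMask n with
  | case1 n h =>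
    have hd : ∀ d : Int, pvDmem d n = false := by
      intro d; rw [pvDmem, dif_neg (by omega)]
    rw [hd 0, hd 1, hd 2, hd 3]; rfl
  | case2 n h ih =>
    have hm0 : (0:Int) ≤ PySem.Int.mod n 4 := PySem.Int.mod_nonneg _ (by omega)
    have hm4 : PySem.Int.mod n 4 < 4 := PySem.Int.mod_lt _ (by omega)
    have hd : ∀ d : Int, pvDmem d n =
        ((d == PySem.Int.mod n 4) || pvDmem d (PySem.Int.floordiv n 4)) := by
      intro d; rw [pvDmem, dif_pos (by omega)]
    rw [ih, shift_eq_wt _ hm0 hm4, pvWt_bor, hd 0, hd 1, hd 2, hd 3]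
    have hsym : ∀ d : Int, ((d == PySem.Int.mod n 4) : Bool) = (PySem.Int.mod n 4 == d) := by
      intro d
      by_cases hde : d = PySem.Int.mod n 4
      · rw [beq_iff_eq.mpr hde, beq_iff_eq.mpr hde.symm]
      · rw [beq_eq_false_iff_ne.mpr hde, beq_eq_false_iff_ne.mpr (Ne.symm hde)]
    rw [hsym 0, hsym 1, hsym 2, hsym 3]
    simp only [Bool.or_comm]

lemma alt_true_iff (a b : Int) :
    czy_4_zgodne_alt a b = true ↔ ∀ d : Int, pvDmem d a = pvDmem d b := by
  unfold czy_4_zgodne_alt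
  rw [beq_iff_eq, mask_eq_wt, mask_eq_wt, pvWt_inj]
  constructor
  · rintro ⟨h0, h1, h2, h3⟩ d
    by_cases hda : pvDmem d a = true
    · obtain ⟨hl, hr⟩ := pvDmem_range d a hda
      interval_cases d <;> assumption
    · by_cases hdb : pvDmem d b = true
      · obtain ⟨hl, hr⟩ := pvDmem_range d b hdb
        interval_cases d <;> assumption
      · rw [Bool.not_eq_true] at hda hdb; rw [hda, hdb]
  · intro h; exact ⟨h 0, h 1, h 2, h 3⟩

lemma pyGetD_pySetD_int (T : List Int) (m v e : Int) (hm0 : 0 ≤ m) (hm4 : m.toNat < T.length)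
    (he0 : 0 ≤ e) (he4 : e < T.length) :
    PySem.List.pyGetD (PySem.List.pySetD T m v) e 0 = if e = m then v else PySem.List.pyGetD T e 0 := by
  rw [PySem.List.pySetD_of_nonneg _ _ hm0]
  rw [PySem.List.pyGetD_eq_getElem _ _ he0 (by simpa using he4)]
  rw [PySem.List.pyGetD_eq_getElem _ _ he0 (by simpa using he4)]
  rw [List.getElem_set]
  by_cases hde : e = m
  · subst hde; simp
  · rw [if_neg (by omega), if_neg hde]

lemma loop1_length (a : Int) (T : List Int) : (czyA_loop1 a T).length = T.length := by
  fun_induction czyA_loop1 a T with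
  | case1 a T h ih =>
    rw [dite_eq_ite] at ih
    rw [ih]
    split <;> simp [PySem.List.length_pySetD]
  | case2 a T h => rfl

lemma loop1_spec (a : Int) (T : List Int) : T.length = 4 → ∀ d : Int, 0 ≤ d → d < 4 →
    PySem.List.pyGetD (czyA_loop1 a T) d 0 =
      if pvDmem d a = true ∧ PySem.List.pyGetD T d 0 = 0 then 1 else PySem.List.pyGetD T d 0 := by
  fun_induction czyA_loop1 a T with
  | case2 a T h =>
    intro hT d hd0 hd4
    rw [pvDmem, dif_neg h]
    simp
  | case1 a T h ih =>
    intro hT d hd0 hd4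
    have hm0 : (0:Int) ≤ PySem.Int.mod a 4 := PySem.Int.mod_nonneg _ (by omega)
    have hm4 : PySem.Int.mod a 4 < 4 := PySem.Int.mod_lt _ (by omega)
    have hdm : pvDmem d a = ((d == PySem.Int.mod a 4) || pvDmem d (PySem.Int.floordiv a 4)) := by
      rw [pvDmem, dif_pos h]
    by_cases hc : PySem.List.pyGetD T (PySem.Int.mod a 4) 0 = 0
    · simp only [dite_eq_ite] at ih
      simp only [hc, beq_self_eq_true, if_true] at ih ⊢
      have hlen : (PySem.List.pySetD T (PySem.Int.mod a 4) 1).length = 4 := by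
        rw [PySem.List.length_pySetD]; exact hT
      rw [ih hlen d hd0 hd4]
      have hset := pyGetD_pySetD_int T (PySem.Int.mod a 4) 1 d hm0 (by omega) hd0 (by omega)
      rw [hset]
      by_cases hde : d = PySem.Int.mod a 4
      · rw [if_pos hde]
        have hma : pvDmem d a = true := by
          rw [hdm, hde, beq_self_eq_true, Bool.true_or]
        rw [if_neg (fun hh => absurd hh.2 (by norm_num)),
            if_pos ⟨hma, hde ▸ hc⟩]
      · rw [if_neg hde, hdm, beq_eq_false_iff_ne.mpr hde, Bool.false_or]
    · have hcb : (PySem.List.pyGetD T (PySem.Int.mod a 4) 0 == 0) = false := by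
        rw [beq_eq_false_iff_ne]; exact hc
      simp only [dite_eq_ite] at ih
      simp only [hcb, Bool.false_eq_true, if_false] at ih ⊢
      rw [ih hT d hd0 hd4]
      by_cases hde : d = PySem.Int.mod a 4
      · rw [if_neg (fun hh => hc (hde ▸ hh.2)), if_neg (fun hh => hc (hde ▸ hh.2))]
      · rw [hdm, beq_eq_false_iff_ne.mpr hde, Bool.false_or]

lemma loop2_spec (b : Int) (T : List Int) : T.length = 4 →
    (czyA_loop2 b T = none →
      ∃ d : Int, 0 ≤ d ∧ d < 4 ∧ pvDmem d b = true ∧ PySem.List.pyGetD T d 0 = 0)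
    ∧ ∀ T', czyA_loop2 b T = some T' →
        T'.length = 4 ∧
        (∀ d : Int, 0 ≤ d → d < 4 → pvDmem d b = true → PySem.List.pyGetD T d 0 ≠ 0) ∧
        (∀ d : Int, 0 ≤ d → d < 4 →
          PySem.List.pyGetD T' d 0 =
            if pvDmem d b = true ∧ PySem.List.pyGetD T d 0 = 1 then 2
            else PySem.List.pyGetD T d 0) := by
  fun_induction czyA_loop2 b T with
  | case1 b T h hbr ih =>
    intro hT
    have hm0 : (0:Int) ≤ PySem.Int.mod b 4 := PySem.Int.mod_nonneg _ (by omega)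
    have hm4 : PySem.Int.mod b 4 < 4 := PySem.Int.mod_lt _ (by omega)
    have hb1 : PySem.List.pyGetD T (PySem.Int.mod b 4) 0 = 1 := by
      rwa [beq_iff_eq] at hbr
    have hdm : ∀ d : Int, pvDmem d b = ((d == PySem.Int.mod b 4) || pvDmem d (PySem.Int.floordiv b 4)) := by
      intro d; rw [pvDmem, dif_pos h]
    have hlen : (PySem.List.pySetD T (PySem.Int.mod b 4) 2).length = 4 := by
      rw [PySem.List.length_pySetD]; exact hT
    obtain ⟨ihn, ihs⟩ := ih hlen
    have hset : ∀ d : Int, 0 ≤ d → d < 4 →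
        PySem.List.pyGetD (PySem.List.pySetD T (PySem.Int.mod b 4) 2) d 0 =
          if d = PySem.Int.mod b 4 then 2 else PySem.List.pyGetD T d 0 := by
      intro d hd0 hd4
      exact pyGetD_pySetD_int T (PySem.Int.mod b 4) 2 d hm0 (by omega) hd0 (by omega)
    constructor
    · intro hnone
      obtain ⟨d, hd0, hd4, hdb, hTd⟩ := ihn hnone
      refine ⟨d, hd0, hd4, ?_, ?_⟩
      · rw [hdm d, hdb, Bool.or_true]
      · rw [hset d hd0 hd4] at hTd
        by_cases hde : d = PySem.Int.mod b 4
        · rw [if_pos hde] at hTd; norm_num at hTd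
        · rwa [if_neg hde] at hTd
    · intro T' hT'
      obtain ⟨hlen', hnz, hval⟩ := ihs T' hT'
      refine ⟨hlen', ?_, ?_⟩
      · intro d hd0 hd4 hdb
        by_cases hde : d = PySem.Int.mod b 4
        · rw [hde, hb1]; norm_num
        · rw [hdm d, beq_eq_false_iff_ne.mpr hde, Bool.false_or] at hdb
          have h2 := hnz d hd0 hd4 hdb
          rw [hset d hd0 hd4, if_neg hde] at h2
          exact h2
      · intro d hd0 hd4
        rw [hval d hd0 hd4, hset d hd0 hd4, hdm d]
        by_cases hde : d = PySem.Int.mod b 4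
        · rw [if_pos hde]
          rw [if_neg (fun hh => absurd hh.2 (by norm_num)),
              if_pos ⟨by rw [beq_iff_eq.mpr hde, Bool.true_or], hde ▸ hb1⟩]
        · rw [if_neg hde, beq_eq_false_iff_ne.mpr hde, Bool.false_or]
  | case2 b T h hbr1 hbr2 =>
    intro hT
    have hm0 : (0:Int) ≤ PySem.Int.mod b 4 := PySem.Int.mod_nonneg _ (by omega)
    have hm4 : PySem.Int.mod b 4 < 4 := PySem.Int.mod_lt _ (by omega)
    constructor
    · intro _
      refine ⟨PySem.Int.mod b 4, hm0, hm4, ?_, by rwa [beq_iff_eq] at hbr2⟩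
      rw [pvDmem, dif_pos h, beq_self_eq_true, Bool.true_or]
    · intro T' hT'
      cases hT'
  | case3 b T h hbr1 hbr2 ih =>
    intro hT
    have hm0 : (0:Int) ≤ PySem.Int.mod b 4 := PySem.Int.mod_nonneg _ (by omega)
    have hm4 : PySem.Int.mod b 4 < 4 := PySem.Int.mod_lt _ (by omega)
    have hb0 : PySem.List.pyGetD T (PySem.Int.mod b 4) 0 ≠ 0 := by
      simpa using hbr2
    have hb1 : PySem.List.pyGetD T (PySem.Int.mod b 4) 0 ≠ 1 := by
      simpa using hbr1
    have hdm : ∀ d : Int, pvDmem d b = ((d == PySem.Int.mod b 4) || pvDmem d (PySem.Int.floordiv b 4)) := by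
      intro d; rw [pvDmem, dif_pos h]
    obtain ⟨ihn, ihs⟩ := ih hT
    constructor
    · intro hnone
      obtain ⟨d, hd0, hd4, hdb, hTd⟩ := ihn hnone
      exact ⟨d, hd0, hd4, by rw [hdm d, hdb, Bool.or_true], hTd⟩
    · intro T' hT'
      obtain ⟨hlen', hnz, hval⟩ := ihs T' hT'
      refine ⟨hlen', ?_, ?_⟩
      · intro d hd0 hd4 hdb
        by_cases hde : d = PySem.Int.mod b 4
        · rw [hde]; exact hb0
        · rw [hdm d, beq_eq_false_iff_ne.mpr hde, Bool.false_or] at hdb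
          exact hnz d hd0 hd4 hdb
      · intro d hd0 hd4
        rw [hval d hd0 hd4, hdm d]
        by_cases hde : d = PySem.Int.mod b 4
        · rw [if_neg (fun hh => hb1 (hde ▸ hh.2)), if_neg (fun hh => hb1 (hde ▸ hh.2))]
        · rw [beq_eq_false_iff_ne.mpr hde, Bool.false_or]
  | case4 b T h =>
    intro hT
    constructor
    · intro hnone; cases hnone
    · intro T' hT'
      have hTT : T' = T := by cases hT'; rfl
      subst hTT
      refine ⟨hT, ?_, ?_⟩
      · intro d hd0 hd4 hdb
        rw [pvDmem, dif_neg h] at hdb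
        cases hdb
      · intro d hd0 hd4
        rw [pvDmem, dif_neg h]
        simp

lemma base_getD (d : Int) (hd0 : 0 ≤ d) (hd4 : d < 4) :
    PySem.List.pyGetD ([0, 0, 0, 0] : List Int) d 0 = 0 := by
  interval_cases d <;> rfl

lemma T0_getD (a d : Int) (hd0 : 0 ≤ d) (hd4 : d < 4) :
    PySem.List.pyGetD (czyA_loop1 a [0, 0, 0, 0]) d 0 = if pvDmem d a = true then 1 else 0 := by
  rw [loop1_spec a [0, 0, 0, 0] rfl d hd0 hd4, base_getD d hd0 hd4]
  by_cases hda : pvDmem d a = true <;> simp [hda]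

lemma a_true_iff (a b : Int) :
    czy_4_zgodne a b = true ↔ ∀ d : Int, pvDmem d a = pvDmem d b := by
  unfold czy_4_zgodne
  have hlen : (czyA_loop1 a [0, 0, 0, 0]).length = 4 := loop1_length a [0, 0, 0, 0]
  obtain ⟨hnone, hsome⟩ := loop2_spec b (czyA_loop1 a [0, 0, 0, 0]) hlen
  cases hm : czyA_loop2 b (czyA_loop1 a [0, 0, 0, 0]) with
  | none =>
    simp only [Bool.false_eq_true, false_iff]
    intro hAB
    obtain ⟨d, hd0, hd4, hdb, hTd⟩ := hnone hm
    rw [T0_getD a d hd0 hd4, hAB d, hdb, if_pos rfl] at hTd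
    norm_num at hTd
  | some T'' =>
    obtain ⟨hlen', hnz, hval⟩ := hsome T'' hm
    rw [List.all_eq_true]
    constructor
    · intro hall d
      by_cases hdb : pvDmem d b = true
      · obtain ⟨hd0, hd4⟩ := pvDmem_range d b hdb
        have := hnz d hd0 hd4 hdb
        rw [T0_getD a d hd0 hd4] at this
        by_cases hda : pvDmem d a = true
        · rw [hda, hdb]
        · rw [if_neg hda] at this; exact absurd rfl this
      · by_cases hda : pvDmem d a = true
        · exfalso
          obtain ⟨hd0, hd4⟩ := pvDmem_range d a hda
          have hv := hval d hd0 hd4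
          rw [T0_getD a d hd0 hd4, if_pos hda] at hv
          rw [if_neg (fun hh => hdb hh.1)] at hv
          have hmem : PySem.List.pyGetD T'' d 0 ∈ T'' := by
            rw [PySem.List.pyGetD_eq_getElem _ _ hd0 (by omega)]
            exact List.getElem_mem _
          have := hall _ hmem
          rw [hv] at this
          norm_num at this
        · rw [Bool.not_eq_true] at hda hdb
          rw [hda, hdb]
    · intro hAB x hx
      obtain ⟨k, hk, hxk⟩ := List.mem_iff_getElem.mp hx
      rw [Bool.not_eq_eq_eq_not, Bool.not_true, beq_eq_false_iff_ne]
      have hd0 : (0:Int) ≤ (k:Int) := Int.natCast_nonneg k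
      have hd4 : ((k:Int)) < 4 := by rw [hlen'] at hk; exact_mod_cast hk
      have hx' : x = PySem.List.pyGetD T'' (k:Int) 0 := by
        rw [PySem.List.pyGetD_eq_getElem _ _ hd0 (by omega)]
        simp [hxk]
      rw [hx', hval (k:Int) hd0 hd4, T0_getD a (k:Int) hd0 hd4, ← hAB (k:Int)]
      by_cases hda : pvDmem (k:Int) a = true
      · rw [if_pos hda, if_pos ⟨hda, rfl⟩]; norm_num
      · rw [if_neg hda, if_neg (fun hh => hda hh.1)]; norm_num

-- ===== VERDICT (by name: the statement is the Claim_ definition above) =====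
theorem czy_4_zgodne_spec : Claim_equal_czy_4_zgodne := by
  intro a b _
  unfold Spec_czy_4_zgodne
  have h := (a_true_iff a b).trans (alt_true_iff a b).symm
  cases hA : czy_4_zgodne a b <;> cases hB : czy_4_zgodne_alt a b <;> simp_all
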